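-- pv_equiv track=rewrite | github.com/ivceh/Advent-of-Code-2021 | AoC2021_03.py | gamma_epsilon_rate
-- ===== SOURCE A (Python) =====
-- def count_bits(A, i):
--     cnt0 = cnt1 = 0
--     for n in A:
--         if n[i] == '0':
--             cnt0 += 1
--         elif n[i] == '1':
--             cnt1 += 1
--         else:
--             raise ValueError("Bits must be either 0 or 1!")
--     return cnt0, cnt1
--
-- def gamma_epsilon_rate(A):
--     gamma = ""
--     epsilon = ""
--     for i in range(len(A[0])):
--         cnt0, cnt1 = count_bits(A, i)
--         if cnt0 > cnt1:
--             gamma += '0'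
--             epsilon += '1'
--         else:
--             gamma += '1'
--             epsilon += '0'
--     return gamma, epsilon
-- ===== SOURCE B (Python) =====
-- def gamma_epsilon_rate(A):
--     m = len(A[0])
--     diff = [0] * m
--     for n in A:
--         row = []
--         for i in range(m):
--             c = n[i]
--             if c == '0':
--                 row.append(-1)
--             elif c == '1':
--                 row.append(1)
--             else:
--                 raise ValueError("Bits must be either 0 or 1!")
--         diff = [a + b for a, b in zip(diff, row)]
--     gamma = "".join('0' if d < 0 else '1' for d in diff)
--     epsilon = "".join('1' if d < 0 else '0' for d in diff)
--     return gamma, epsilon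
-- ===== Notes on version B (the rewrite author's own statement) =====
-- stated objective: alternative
-- what changed: B replaces A's m separate full-column scans (count_bits called once per bit position) by a single pass over the rows that accumulates a per-column signed vote vector, followed by one shaping pass that builds gamma/epsilon from that vector.
import Mathlib
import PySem

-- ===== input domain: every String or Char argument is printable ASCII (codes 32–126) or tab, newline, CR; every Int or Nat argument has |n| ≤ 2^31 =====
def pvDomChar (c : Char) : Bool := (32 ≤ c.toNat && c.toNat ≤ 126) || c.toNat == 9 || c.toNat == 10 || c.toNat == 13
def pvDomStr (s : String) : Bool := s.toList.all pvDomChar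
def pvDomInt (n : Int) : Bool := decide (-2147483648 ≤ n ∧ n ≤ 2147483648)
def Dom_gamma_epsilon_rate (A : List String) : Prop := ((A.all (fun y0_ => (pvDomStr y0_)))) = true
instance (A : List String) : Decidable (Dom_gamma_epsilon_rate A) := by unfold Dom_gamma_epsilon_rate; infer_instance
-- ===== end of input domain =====

-- B replaces A's per-column rescans by one accumulation pass over the rows plus a shaping pass (same asymptotic cost, different decomposition).

-- ===== PORT A =====
-- count_bits(A, i): scans ALL rows for one column i; the ValueError branch is excluded by Pre_ (port leaves the counts unchanged there)
def count_bits (A : List String) (i : Int) : Int × Int :=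
  A.foldl (fun c n =>
    if PySem.Str.pyGet? n i = some '0' then (c.1 + 1, c.2)
    else if PySem.Str.pyGet? n i = some '1' then (c.1, c.2 + 1)
    else c) (0, 0)

def gamma_epsilon_rate (A : List String) : String × String :=
  -- A[0] raises IndexError on empty A (excluded by Pre_); strings built as Char lists, String.ofList at return
  let m : Int := PySem.Str.len (PySem.List.pyGetD A 0 "")
  let ge := (PySem.List.pyRange 0 m 1).foldl (fun (ge : List Char × List Char) i =>
    let c := count_bits A i
    if c.1 > c.2 then (ge.1 ++ ['0'], ge.2 ++ ['1'])
    else (ge.1 ++ ['1'], ge.2 ++ ['0'])) ([], [])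
  (String.ofList ge.1, String.ofList ge.2)

-- ===== PORT B =====
-- inner loop of Source B: per-row vote vector; the ValueError/IndexError branch (excluded by Pre_) appends 0
def rowVotes (n : String) (m : Nat) : List Int :=
  (List.range m).foldl (fun row (i : Nat) =>
    match PySem.Str.pyGet? n (i : Int) with
    | some '0' => row ++ [-1]
    | some '1' => row ++ [1]
    | _ => row ++ [0]) []

def gamma_epsilon_rate_alt (A : List String) : String × String :=
  let m : Nat := (PySem.List.pyGetD A 0 "").toList.length
  let diff := A.foldl (fun diff n => ((diff.zip (rowVotes n m)).map fun p => p.1 + p.2))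
    (List.replicate m 0)
  (String.ofList (diff.map fun d => if d < 0 then '0' else '1'),
   String.ofList (diff.map fun d => if d < 0 then '1' else '0'))

-- ===== PRECONDITION & SPEC =====
-- Pre_ is exactly where A returns: A nonempty (else A[0] raises IndexError), and every row has a
-- '0'/'1' at every position below len(A[0]) (else count_bits raises IndexError or ValueError).
def Pre_gamma_epsilon_rate (A : List String) : Prop :=
  A ≠ [] ∧ ∀ n ∈ A, ∀ i < (A.headD "").toList.length,
    n.toList[i]? = some '0' ∨ n.toList[i]? = some '1'
instance (A : List String) : Decidable (Pre_gamma_epsilon_rate A) := by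
  unfold Pre_gamma_epsilon_rate; infer_instance

def pvWitness_gamma_epsilon_rate : List String := ["01", "11", "10"]

def Spec_gamma_epsilon_rate (A : List String) (out : String × String) : Prop := out = gamma_epsilon_rate_alt A
instance (A : List String) (out : String × String) : Decidable (Spec_gamma_epsilon_rate A out) := by unfold Spec_gamma_epsilon_rate; infer_instance

-- ===== CLAIM (what is proved, stated in full; the proofs are below) =====
def Claim_equal_gamma_epsilon_rate : Prop := ∀ (A : List String), Dom_gamma_epsilon_rate A → Pre_gamma_epsilon_rate A → Spec_gamma_epsilon_rate A (gamma_epsilon_rate A)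

-- ===== LEMMAS AND PROOFS =====

-- count of rows whose column-j character is c
def colCnt (A : List String) (j : Nat) (c : Char) : Nat :=
  A.countP (fun n => decide (n.toList[j]? = some c))

-- signed vote of row n in column j (meaningful under Pre_)
def vote (n : String) (j : Nat) : Int :=
  if n.toList[j]? = some '0' then -1 else 1

theorem count_bits_char (A : List String) (j : Nat) :
    count_bits A (j : Int) = ((colCnt A j '0' : Int), (colCnt A j '1' : Int)) := by
  unfold count_bits colCnt
  have hbody : (fun (c : Int × Int) (n : String) =>
      if PySem.Str.pyGet? n (j : Int) = some '0' then (c.1 + 1, c.2)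
      else if PySem.Str.pyGet? n (j : Int) = some '1' then (c.1, c.2 + 1)
      else c)
      = fun (c : Int × Int) (n : String) =>
        ((if n.toList[j]? = some '0' then c.1 + 1 else c.1),
         (if n.toList[j]? = some '1' then c.2 + 1 else c.2)) := by
    funext c n
    simp only [PySem.Str.pyGet?_natCast]
    split_ifs with h1 h2 <;> simp_all
  rw [hbody]
  have hsplit := PySem.List.foldl_prod_mk
    (f := fun (a : Int) n => if n.toList[j]? = some '0' then a + 1 else a)
    (g := fun (a : Int) n => if n.toList[j]? = some '1' then a + 1 else a)
    A (0 : Int) (0 : Int)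
  simp only [hsplit]
  rw [PySem.List.foldl_ite_add_one, PySem.List.foldl_ite_add_one]
  simp

theorem zip_map_add {α : Type} (l : List α) (f g : α → Int) :
    ((l.map f).zip (l.map g)).map (fun p => p.1 + p.2) = l.map (fun x => f x + g x) := by
  induction l with
  | nil => rfl
  | cons x t ih => simp [ih]

theorem rowVotes_eq (n : String) (m : Nat)
    (h : ∀ i < m, n.toList[i]? = some '0' ∨ n.toList[i]? = some '1') :
    rowVotes n m = (List.range m).map (fun i => vote n i) := by
  unfold rowVotes
  have h1 : List.foldl (fun (row : List Int) (i : Nat) => row ++ [vote n i]) [] (List.range m)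
      = List.map (fun i => vote n i) (List.range m) := by
    simpa using PySem.List.foldl_append_singleton_eq_map
      (f := fun i => vote n i) (l := List.range m) (acc := ([] : List Int))
  rw [← h1]
  apply PySem.List.foldl_congr_mem'
  intro i hi row
  have him : i < m := List.mem_range.mp hi
  rcases h i him with h0 | h1
  · simp [h0, vote]
  · simp [h1, vote]

theorem fold_rows (A : List String) (m : Nat)
    (hv : ∀ n ∈ A, ∀ i < m, n.toList[i]? = some '0' ∨ n.toList[i]? = some '1') :
    ∀ h : Nat → Int,
    A.foldl (fun diff n => ((diff.zip (rowVotes n m)).map fun p => p.1 + p.2))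
      ((List.range m).map h)
      = (List.range m).map (fun i => h i + (A.map (fun n => vote n i)).sum) := by
  induction A with
  | nil => intro h; simp
  | cons n t ih =>
    intro h
    have hn := hv n (by simp)
    simp only [List.foldl_cons]
    rw [rowVotes_eq n m hn, zip_map_add]
    rw [ih (fun n' hn' => hv n' (by simp [hn'])) (fun i => h i + vote n i)]
    refine List.map_congr_left ?_
    intro i _
    simp [add_assoc]

theorem col_sum (A : List String) (j m : Nat) (hj : j < m)
    (hv : ∀ n ∈ A, ∀ i < m, n.toList[i]? = some '0' ∨ n.toList[i]? = some '1') :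
    (A.map (fun n => vote n j)).sum = (colCnt A j '1' : Int) - (colCnt A j '0' : Int) := by
  induction A with
  | nil => simp [colCnt]
  | cons n t ih =>
    have hn := hv n (by simp) j hj
    have ht := ih (fun n' hn' => hv n' (by simp [hn']))
    simp only [List.map_cons, List.sum_cons, ht, colCnt, List.countP_cons]
    rcases hn with h0 | h1
    · simp [vote, h0]; ring
    · simp [vote, h1]; ring

theorem gamma_A_char (A : List String) (m : Nat)
    (hm : PySem.Str.len (PySem.List.pyGetD A 0 "") = (m : Int)) :
    gamma_epsilon_rate A =
      (String.ofList ((List.range m).map fun j =>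
          if colCnt A j '0' > colCnt A j '1' then '0' else '1'),
       String.ofList ((List.range m).map fun j =>
          if colCnt A j '0' > colCnt A j '1' then '1' else '0')) := by
  unfold gamma_epsilon_rate
  simp only [hm]
  rw [PySem.List.pyRange_zero_natCast]
  rw [List.foldl_map]
  have hbody : (fun (ge : List Char × List Char) (j : Nat) =>
      let c := count_bits A (j : Int)
      if c.1 > c.2 then (ge.1 ++ ['0'], ge.2 ++ ['1'])
      else (ge.1 ++ ['1'], ge.2 ++ ['0']))
      = fun (ge : List Char × List Char) (j : Nat) =>
        (ge.1 ++ [if colCnt A j '0' > colCnt A j '1' then '0' else '1'],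
         ge.2 ++ [if colCnt A j '0' > colCnt A j '1' then '1' else '0']) := by
    funext ge j
    simp only [count_bits_char]
    split_ifs with h1 h2 h2 <;> first | rfl | (exfalso; omega)
  rw [hbody]
  have hsplit := PySem.List.foldl_prod_mk
    (f := fun (g : List Char) j => g ++ [if colCnt A j '0' > colCnt A j '1' then '0' else '1'])
    (g := fun (e : List Char) j => e ++ [if colCnt A j '0' > colCnt A j '1' then '1' else '0'])
    (List.range m) ([] : List Char) ([] : List Char)
  simp only [hsplit]
  rw [PySem.List.foldl_append_singleton_eq_map, PySem.List.foldl_append_singleton_eq_map]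
  simp

-- ===== VERDICT (by name: the statement is the Claim_ definition above) =====
theorem gamma_epsilon_rate_spec : Claim_equal_gamma_epsilon_rate := by
  intro A _ hpre
  obtain ⟨hne, hv⟩ := hpre
  unfold Spec_gamma_epsilon_rate
  obtain ⟨a, t, rfl⟩ : ∃ a t, A = a :: t := by
    cases A with
    | nil => exact absurd rfl hne
    | cons a t => exact ⟨a, t, rfl⟩
  set A := a :: t with hA
  set m : Nat := a.toList.length with hmdef
  have hhead : PySem.List.pyGetD A 0 "" = a := by simp [hA, PySem.List.pyGetD_zero_cons]
  have hv' : ∀ n ∈ A, ∀ i < m, n.toList[i]? = some '0' ∨ n.toList[i]? = some '1' := by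
    intro n hn i hi
    exact hv n hn i (by simpa [hA] using hi)
  have hmInt : PySem.Str.len (PySem.List.pyGetD A 0 "") = (m : Int) := by
    rw [hhead]; simp [PySem.Str.len_eq, hmdef]
  rw [gamma_A_char A m hmInt]
  simp only [gamma_epsilon_rate_alt, hhead]
  have hrep : (List.replicate m (0 : Int)) = (List.range m).map (fun _ => 0) := by
    simp [List.map_const']
  rw [show (a.toList.length) = m from rfl, hrep, fold_rows A m hv' (fun _ => 0)]
  simp only [List.map_map]
  rw [Prod.mk.injEq]
  constructor <;>
  · refine congrArg String.ofList (List.map_congr_left ?_)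
    intro j hj
    have hjm : j < m := List.mem_range.mp hj
    have hs := col_sum A j m hjm hv'
    simp only [Function.comp, hs, zero_add]
    split_ifs with ha hb hb <;> first | rfl | (exfalso; omega)
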